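-- pv_equiv track=rewrite | github.com/HeavyFalcon678/CrunchLabs-Hack-Pack-Label-Maker-Custom-Image-Plotter-Hack | label_image/label_image.py | pack_bitmap
-- ===== SOURCE A (Python) =====
-- def pack_bitmap(matrix, grid_size):
--     # Create a list of bits in serpentine order:
--     # even rows: left-to-right, odd rows: right-to-left.
--     bit_list = []
--     for i in range(grid_size):
--         if i % 2 == 0:
--             for j in range(grid_size):
--                 bit_list.append(matrix[i][j])
--         else:
--             for j in reversed(range(grid_size)):
--                 bit_list.append(matrix[i][j])
--     # Pack bits into bytes (8 bits per byte, LSB first)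
--     n_bits = len(bit_list)
--     n_bytes = (n_bits + 7) // 8
--     byte_array = []
--     for b in range(n_bytes):
--         byte_val = 0
--         for bit in range(8):
--             index = b * 8 + bit
--             if index < n_bits and bit_list[index]:
--                 byte_val |= (1 << bit)
--         byte_array.append(byte_val)
--     return byte_array
-- ===== SOURCE B (Python) =====
-- def pack_bitmap(matrix, grid_size):
--     # Single streaming pass: walk the cells in serpentine order, accumulating
--     # the current byte and flushing it every 8 bits; no intermediate bit list.
--     out = []
--     cur = 0
--     nbit = 0
--     for i in range(grid_size):
--         row = matrix[i]
--         cols = range(grid_size) if i % 2 == 0 else range(grid_size - 1, -1, -1)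
--         for j in cols:
--             if row[j]:
--                 cur |= 1 << nbit
--             nbit += 1
--             if nbit == 8:
--                 out.append(cur)
--                 cur = 0
--                 nbit = 0
--     if nbit:
--         out.append(cur)
--     return out
-- ===== Notes on version B (the rewrite author's own statement) =====
-- stated objective: alternative
-- what changed: A builds the whole serpentine bit list and then re-scans it with index arithmetic (byte count, b*8+bit lookups) to assemble bytes; B makes a single streaming pass over the cells with a (current byte, bit position) accumulator, flushing a byte every 8 bits, with no intermediate bit list and no indexed lookups.
import Mathlib
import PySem

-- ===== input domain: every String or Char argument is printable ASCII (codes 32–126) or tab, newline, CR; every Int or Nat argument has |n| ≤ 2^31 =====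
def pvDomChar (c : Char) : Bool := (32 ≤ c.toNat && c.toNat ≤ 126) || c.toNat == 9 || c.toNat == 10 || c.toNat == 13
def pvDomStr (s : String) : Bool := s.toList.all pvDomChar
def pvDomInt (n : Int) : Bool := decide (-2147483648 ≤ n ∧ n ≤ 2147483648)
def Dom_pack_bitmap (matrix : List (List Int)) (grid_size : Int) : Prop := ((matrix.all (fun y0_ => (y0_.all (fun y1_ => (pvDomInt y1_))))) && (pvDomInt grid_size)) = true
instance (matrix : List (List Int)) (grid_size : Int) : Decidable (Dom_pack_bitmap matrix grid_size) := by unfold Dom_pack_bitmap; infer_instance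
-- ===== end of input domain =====

-- B replaces A's build-a-bit-list-then-index-it-by-byte two-phase packing by a single
-- streaming pass over the serpentine cells with a (current byte, bit position) accumulator.

-- ===== PORT A =====
-- matrix[i][j]; pyGetD defaults never fire inside Pre_ (indices are in range there)
def pvCellA (matrix : List (List Int)) (i j : Int) : Int :=
  PySem.List.pyGetD (PySem.List.pyGetD matrix i []) j 0

def pack_bitmap (matrix : List (List Int)) (grid_size : Int) : List Int :=
  let bit_list : List Int :=
    (PySem.List.pyRange 0 grid_size 1).foldl (fun acc i =>
      if PySem.Int.mod i 2 = 0 then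
        (PySem.List.pyRange 0 grid_size 1).foldl
          (fun acc2 j => acc2 ++ [pvCellA matrix i j]) acc
      else
        -- reversed(range(grid_size))
        ((PySem.List.pyRange 0 grid_size 1).reverse).foldl
          (fun acc2 j => acc2 ++ [pvCellA matrix i j]) acc) []
  let n_bits : Int := (bit_list.length : Int)
  let n_bytes : Int := PySem.Int.floordiv (n_bits + 7) 8
  (PySem.List.pyRange 0 n_bytes 1).foldl (fun arr b =>
    let byte_val : Int :=
      (PySem.List.pyRange 0 8 1).foldl (fun bv bit =>
        if b * 8 + bit < n_bits ∧ PySem.List.pyGetD bit_list (b * 8 + bit) 0 ≠ 0 then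
          PySem.Int.bor bv ((1 : Int) <<< bit.toNat)   -- 1 << bit; bit ∈ [0,8), so .toNat is exact
        else bv) 0
    arr ++ [byte_val]) []

-- ===== PORT B =====
-- one streaming step of Source B's inner loop: state (out, cur, nbit), incoming cell value x
def pvStepB (s : List Int × Int × Int) (x : Int) : List Int × Int × Int :=
  let cur := if x ≠ 0 then PySem.Int.bor s.2.1 ((1 : Int) <<< s.2.2.toNat) else s.2.1  -- nbit ∈ [0,8)
  let nbit := s.2.2 + 1
  if nbit = 8 then (s.1 ++ [cur], 0, 0) else (s.1, cur, nbit)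

def pack_bitmap_alt (matrix : List (List Int)) (grid_size : Int) : List Int :=
  let s :=
    (PySem.List.pyRange 0 grid_size 1).foldl (fun s i =>
      let row := PySem.List.pyGetD matrix i []
      let cols := if PySem.Int.mod i 2 = 0 then PySem.List.pyRange 0 grid_size 1
                  else PySem.List.pyRange (grid_size - 1) (-1) (-1)
      cols.foldl (fun s j => pvStepB s (PySem.List.pyGetD row j 0)) s)
      (([] : List Int), (0 : Int), (0 : Int))
  if s.2.2 ≠ 0 then s.1 ++ [s.2.1] else s.1

-- ===== PRECONDITION & SPEC =====
-- Pre_: exactly where Python A returns (no IndexError): the first grid_size rows exist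
-- and each has at least grid_size cells (vacuous for grid_size ≤ 0, where A returns []).
def Pre_pack_bitmap (matrix : List (List Int)) (grid_size : Int) : Prop :=
  grid_size ≤ (matrix.length : Int) ∧
  ∀ row ∈ matrix.take grid_size.toNat, grid_size ≤ (row.length : Int)
instance (matrix : List (List Int)) (grid_size : Int) : Decidable (Pre_pack_bitmap matrix grid_size) := by
  unfold Pre_pack_bitmap; infer_instance

def pvWitness_pack_bitmap : List (List Int) × Int := ([[1, 0, 1], [0, 1, 0], [1, 1, 0]], 3)

def Spec_pack_bitmap (matrix : List (List Int)) (grid_size : Int) (out : List Int) : Prop := out = pack_bitmap_alt matrix grid_size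
instance (matrix : List (List Int)) (grid_size : Int) (out : List Int) : Decidable (Spec_pack_bitmap matrix grid_size out) := by unfold Spec_pack_bitmap; infer_instance

-- ===== CLAIM (what is proved, stated in full; the proofs are below) =====
def Claim_equal_pack_bitmap : Prop := ∀ (matrix : List (List Int)) (grid_size : Int), Dom_pack_bitmap matrix grid_size → Pre_pack_bitmap matrix grid_size → Spec_pack_bitmap matrix grid_size (pack_bitmap matrix grid_size)

-- ===== LEMMAS AND PROOFS =====

-- the serpentine column order of row i, and the flat serpentine cell stream
def pvCols (g i : Int) : List Int :=
  if PySem.Int.mod i 2 = 0 then PySem.List.pyRange 0 g 1 else (PySem.List.pyRange 0 g 1).reverse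

def pvSerp (matrix : List (List Int)) (g : Int) : List Int :=
  (PySem.List.pyRange 0 g 1).flatMap (fun i => (pvCols g i).map (pvCellA matrix i))

-- A's phase 2, as a map over byte indices
def pvByte (bits : List Int) (b : Int) : Int :=
  (PySem.List.pyRange 0 8 1).foldl (fun bv bit =>
    if b * 8 + bit < (bits.length : Int) ∧ PySem.List.pyGetD bits (b * 8 + bit) 0 ≠ 0 then
      PySem.Int.bor bv ((1 : Int) <<< bit.toNat)
    else bv) 0

def pvPack (bits : List Int) : List Int :=
  (PySem.List.pyRange 0 (PySem.Int.floordiv ((bits.length : Int) + 7) 8) 1).map (pvByte bits)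

-- complete the current byte (started at bit position nbit) from the head of the stream
def pvFill (cur : Int) (nbit : Nat) : List Int → Int
  | [] => cur
  | x :: xs =>
    if 8 ≤ nbit then cur
    else pvFill (if x ≠ 0 then PySem.Int.bor cur ((1 : Int) <<< nbit) else cur) (nbit + 1) xs

-- the flushed output of B's automaton run from state (·, cur, nbit)
def pvPP (cur nbit : Int) : List Int → List Int
  | [] => if nbit ≠ 0 then [cur] else []
  | x :: xs =>
    let cur' := if x ≠ 0 then PySem.Int.bor cur ((1 : Int) <<< nbit.toNat) else cur
    if nbit + 1 = 8 then cur' :: pvPP 0 0 xs else pvPP cur' (nbit + 1) xs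

theorem pvA_eq_pack (matrix : List (List Int)) (g : Int) :
    pack_bitmap matrix g = pvPack (pvSerp matrix g) := by
  simp only [pack_bitmap]
  have hbl : (PySem.List.pyRange 0 g 1).foldl (fun acc i =>
      if PySem.Int.mod i 2 = 0 then
        (PySem.List.pyRange 0 g 1).foldl (fun acc2 j => acc2 ++ [pvCellA matrix i j]) acc
      else
        ((PySem.List.pyRange 0 g 1).reverse).foldl (fun acc2 j => acc2 ++ [pvCellA matrix i j]) acc)
      [] = pvSerp matrix g := by
    rw [PySem.List.foldl_congr_mem _ _
      (fun acc i => acc ++ (pvCols g i).map (pvCellA matrix i)) _ ?_]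
    · rw [PySem.List.foldl_append_eq_flatMap, List.nil_append, pvSerp]
    · intro acc i _
      simp only [pvCols]
      split_ifs with h
      · exact PySem.List.foldl_append_singleton_eq_map _ _ _
      · exact PySem.List.foldl_append_singleton_eq_map _ _ _
  rw [hbl]
  exact (PySem.List.foldl_append_singleton_eq_map (pvByte (pvSerp matrix g)) _ []).trans
    (List.nil_append _)

theorem pvB_eq_run (matrix : List (List Int)) (g : Int) :
    pack_bitmap_alt matrix g =
      (fun s : List Int × Int × Int => if s.2.2 ≠ 0 then s.1 ++ [s.2.1] else s.1)
        ((pvSerp matrix g).foldl pvStepB ([], 0, 0)) := by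
  simp only [pack_bitmap_alt, pvSerp, List.foldl_flatMap]
  have hs : (PySem.List.pyRange 0 g 1).foldl (fun s i =>
        (if PySem.Int.mod i 2 = 0 then PySem.List.pyRange 0 g 1
            else PySem.List.pyRange (g - 1) (-1) (-1)).foldl
          (fun s j => pvStepB s (PySem.List.pyGetD (PySem.List.pyGetD matrix i []) j 0)) s)
        (([] : List Int), (0 : Int), (0 : Int)) =
      (PySem.List.pyRange 0 g 1).foldl (fun acc i =>
        ((pvCols g i).map (pvCellA matrix i)).foldl pvStepB acc)
        (([] : List Int), (0 : Int), (0 : Int)) := by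
    apply PySem.List.foldl_congr_mem
    intro s i _
    rw [List.foldl_map]
    simp only [pvCols, pvCellA]
    split_ifs with h
    · rfl
    · rw [PySem.List.pyRange_neg_one_eq_reverse]
      norm_num
  rw [hs]

theorem pvRun_eq_pp (bits : List Int) : ∀ (out : List Int) (cur nbit : Int),
    (fun s : List Int × Int × Int => if s.2.2 ≠ 0 then s.1 ++ [s.2.1] else s.1)
      (bits.foldl pvStepB (out, cur, nbit)) = out ++ pvPP cur nbit bits := by
  induction bits with
  | nil => intro out cur nbit; simp [pvPP]; split_ifs <;> simp
  | cons x xs ih =>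
    intro out cur nbit
    simp only [List.foldl_cons, pvStepB, pvPP]
    by_cases h : nbit + 1 = 8
    · simp [h, ih]
    · simp [h, ih]

theorem pvPP_run (bits : List Int) : ∀ (cur nbit : Int), 0 ≤ nbit → nbit < 8 →
    pvPP cur nbit bits =
      if bits = [] ∧ nbit = 0 then []
      else pvFill cur nbit.toNat bits :: pvPP 0 0 (bits.drop (8 - nbit.toNat)) := by
  induction bits with
  | nil =>
    intro cur nbit h0 h8
    by_cases h : nbit = 0
    · simp [pvPP, h]
    · simp [pvPP, h, pvFill]
  | cons x xs ih =>
    intro cur nbit h0 h8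
    have hn8 : ¬ 8 ≤ nbit.toNat := by omega
    have ht : (nbit + 1).toNat = nbit.toNat + 1 := by omega
    simp only [pvPP, pvFill, if_neg hn8, if_neg (by simp : ¬(x :: xs = [] ∧ nbit = 0))]
    by_cases h : nbit + 1 = 8
    · have : nbit.toNat = 7 := by omega
      simp only [h, this]
      have hfill : ∀ c : Int, pvFill c 8 xs = c := by intro c; cases xs <;> simp [pvFill]
      simp [hfill]
    · rw [if_neg h, ih _ _ (by omega) (by omega), if_neg (by omega : ¬ (xs = [] ∧ nbit + 1 = 0)),
        ht]
      have hdrop : 8 - nbit.toNat = (8 - (nbit.toNat + 1)) + 1 := by omega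
      rw [hdrop, List.drop_succ_cons]

theorem pvFill_spec : ∀ (k : Nat) (l : List Int) (cur : Int) (nbit : Nat), nbit + k = 8 →
    pvFill cur nbit l =
      (List.range k).foldl (fun bv t =>
        if t < l.length ∧ l.getD t 0 ≠ 0 then PySem.Int.bor bv ((1 : Int) <<< (nbit + t)) else bv) cur := by
  intro k
  induction k with
  | zero =>
    intro l cur nbit h
    have : nbit = 8 := by omega
    subst this
    cases l <;> simp [pvFill]
  | succ k ih =>
    intro l cur nbit h
    cases l with
    | nil =>
      simp only [pvFill, List.length_nil, Nat.not_lt_zero, false_and, if_false]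
      simp
    | cons x xs =>
      have hn8 : ¬ 8 ≤ nbit := by omega
      rw [List.range_succ_eq_map]
      simp only [pvFill, if_neg hn8, List.foldl_cons, List.foldl_map]
      rw [ih xs _ (nbit + 1) (by omega)]
      have hstep : (if (0 : Nat) < (x :: xs).length ∧ (x :: xs).getD 0 0 ≠ 0 then
          PySem.Int.bor cur ((1 : Int) <<< (nbit + 0)) else cur) =
          (if x ≠ 0 then PySem.Int.bor cur ((1 : Int) <<< nbit) else cur) := by
        simp
      rw [hstep]
      apply PySem.List.foldl_congr_mem
      intro acc t _
      have hc : (t.succ < (x :: xs).length ∧ (x :: xs).getD t.succ 0 ≠ 0) ↔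
          (t < xs.length ∧ xs.getD t 0 ≠ 0) := by
        simp
      rw [if_congr hc rfl rfl, show nbit + t.succ = nbit + 1 + t by omega]

theorem pvByte_eq_fill (bits : List Int) (k : Nat) :
    pvByte bits (k : Int) = pvFill 0 0 (bits.drop (8 * k)) := by
  rw [pvFill_spec 8 _ 0 0 rfl]
  unfold pvByte
  rw [PySem.List.pyRange_one, List.foldl_map]
  norm_num
  apply PySem.List.foldl_congr_mem
  intro acc t _
  have hidx : (k : Int) * 8 + (t : Int) = ((k * 8 + t : Nat) : Int) := by push_cast; ring
  have hget : (bits.drop (8 * k)).getD t 0 = bits.getD (k * 8 + t) 0 := by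
    simp [List.getD_eq_getElem?_getD, List.getElem?_drop, show 8 * k + t = k * 8 + t by omega]
  have hc : ((k : Int) * 8 + (t : Int) < (bits.length : Int) ∧
      PySem.List.pyGetD bits ((k : Int) * 8 + (t : Int)) 0 ≠ 0) ↔
      (t < (bits.drop (8 * k)).length ∧ (bits.drop (8 * k)).getD t 0 ≠ 0) := by
    rw [hidx, PySem.List.pyGetD_natCast]
    constructor
    · rintro ⟨h1, h2⟩
      exact ⟨by simp [List.length_drop]; omega, by rw [hget]; exact h2⟩
    · rintro ⟨h1, h2⟩
      simp [List.length_drop] at h1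
      exact ⟨by exact_mod_cast (by omega : k * 8 + t < bits.length), by rw [← hget]; exact h2⟩
  rw [if_congr hc rfl rfl]
  norm_num

theorem pvPack_eq_map_fill (bits : List Int) :
    pvPack bits = (List.range ((bits.length + 7) / 8)).map (fun t => pvFill 0 0 (bits.drop (8 * t))) := by
  unfold pvPack
  have h1 : (bits.length : Int) + 7 = ((bits.length + 7 : Nat) : Int) := by push_cast; ring
  rw [h1, show ((8:Int)) = ((8:Nat):Int) from rfl, PySem.Int.floordiv_natCast,
    PySem.List.pyRange_one, List.map_map]
  norm_num
  apply List.map_congr_left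
  intro t _
  exact pvByte_eq_fill bits t

theorem pvPP_eq_pack : ∀ (n : Nat) (bits : List Int), bits.length ≤ n →
    pvPP 0 0 bits = pvPack bits := by
  intro n
  induction n with
  | zero =>
    intro bits h
    have : bits = [] := List.eq_nil_of_length_eq_zero (by omega)
    subst this
    simp [pvPP, pvPack_eq_map_fill]
  | succ n ih =>
    intro bits h
    cases hb : bits with
    | nil => simp [pvPP, pvPack_eq_map_fill]
    | cons x xs =>
      subst hb
      rw [pvPP_run _ _ 0 (by omega) (by omega)]
      rw [if_neg (by simp)]
      norm_num
      rw [ih (xs.drop 7) (by simp at h ⊢; omega)]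
      rw [pvPack_eq_map_fill, pvPack_eq_map_fill]
      have hNB : ((x :: xs).length + 7) / 8 = ((xs.drop 7).length + 7) / 8 + 1 := by
        simp [List.length_drop]; omega
      rw [hNB, List.range_succ_eq_map, List.map_cons, List.map_map]
      norm_num
      intro a _
      rw [show (8 * (a + 1) : Nat) = (7 + 8 * a) + 1 from by omega, List.drop_succ_cons]

-- ===== VERDICT (by name: the statement is the Claim_ definition above) =====
theorem pack_bitmap_spec : Claim_equal_pack_bitmap := by
  intro matrix grid_size _ _
  unfold Spec_pack_bitmap
  rw [pvA_eq_pack, pvB_eq_run, pvRun_eq_pp, ← pvPP_eq_pack (pvSerp matrix grid_size).length _ le_rfl,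
    List.nil_append]
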